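-- pv_equiv track=rewrite | github.com/varun-ag1/unpod | apps/super/super/core/voice/eval_agent/eval_test_agent.py | _next_user_seq
-- ===== SOURCE A (Python) =====
-- from typing import Optional, List, Any, Dict
--
-- def _next_user_seq(
--     current_seq: int, user_messages: List[Dict[str, Any]]
-- ) -> Optional[int]:
--     candidates = [
--         int(m.get("sequence_id", 0))
--         for m in user_messages
--         if int(m.get("sequence_id", 0)) > int(current_seq)
--     ]
--     return min(candidates) if candidates else None
-- ===== SOURCE B (Python) =====
-- from typing import Optional, List, Any, Dict
--
-- def _next_user_seq(
--     current_seq: int, user_messages: List[Dict[str, Any]]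
-- ) -> Optional[int]:
--     # Sort all sequence ids ascending; the first one above the threshold
--     # (if any) is the least one above it.
--     cs = int(current_seq)
--     for v in sorted(int(m.get("sequence_id", 0)) for m in user_messages):
--         if v > cs:
--             return v
--     return None
-- ===== Notes on version B (the rewrite author's own statement) =====
-- stated objective: alternative
-- what changed: Replaces filter-then-min with sort-then-scan: sort all sequence ids ascending and return the first sorted value exceeding current_seq (the least qualifying value), instead of building a filtered candidate list and taking its min.
import Mathlib
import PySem

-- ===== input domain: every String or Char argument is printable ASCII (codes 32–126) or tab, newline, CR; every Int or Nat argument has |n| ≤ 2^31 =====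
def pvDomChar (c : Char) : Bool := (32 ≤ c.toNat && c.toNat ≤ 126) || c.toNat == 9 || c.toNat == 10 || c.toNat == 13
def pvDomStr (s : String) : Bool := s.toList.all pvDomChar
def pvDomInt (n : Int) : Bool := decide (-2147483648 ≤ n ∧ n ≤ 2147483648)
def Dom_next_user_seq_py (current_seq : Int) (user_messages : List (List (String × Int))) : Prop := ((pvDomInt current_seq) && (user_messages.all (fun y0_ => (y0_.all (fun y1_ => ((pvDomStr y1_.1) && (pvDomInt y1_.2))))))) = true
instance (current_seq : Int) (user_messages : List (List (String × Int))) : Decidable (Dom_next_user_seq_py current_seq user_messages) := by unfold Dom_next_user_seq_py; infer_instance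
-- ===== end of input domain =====

-- B replaces A's filter-then-min by sort-then-scan: sort all sequence ids ascending and return the first one above current_seq (alternative algorithm, same result).

-- ===== PORT A =====
-- A: candidates = [int(m.get("sequence_id",0)) for m in user_messages if int(m.get("sequence_id",0)) > int(current_seq)]
--    return min(candidates) if candidates else None
def next_user_seq_py (current_seq : Int) (user_messages : List (List (String × Int))) : Option Int :=
  let candidates :=
    (user_messages.filter (fun m => current_seq < (PySem.Dict.mk m).getD "sequence_id" 0)).map
      (fun m => (PySem.Dict.mk m).getD "sequence_id" 0)
  if candidates.isEmpty then none else PySem.List.min? candidates (fun x => x)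

-- ===== PORT B =====
-- B: for v in sorted(int(m.get("sequence_id",0)) for m in user_messages): if v > cs: return v
--    return None      (early-return loop = find? over the sorted list)
def next_user_seq_py_alt (current_seq : Int) (user_messages : List (List (String × Int))) : Option Int :=
  let vals := PySem.List.sorted
      (user_messages.map (fun m => (PySem.Dict.mk m).getD "sequence_id" 0)) (fun x => x) false
  vals.find? (fun v => decide (current_seq < v))

-- ===== PRECONDITION & SPEC =====
def Spec_next_user_seq_py (current_seq : Int) (user_messages : List (List (String × Int))) (out : Option Int) : Prop := out = next_user_seq_py_alt current_seq user_messages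
instance (current_seq : Int) (user_messages : List (List (String × Int))) (out : Option Int) : Decidable (Spec_next_user_seq_py current_seq user_messages out) := by unfold Spec_next_user_seq_py; infer_instance

-- ===== CLAIM =====
def Claim_equal_next_user_seq_py : Prop := ∀ (current_seq : Int) (user_messages : List (List (String × Int))), Dom_next_user_seq_py current_seq user_messages → Spec_next_user_seq_py current_seq user_messages (next_user_seq_py current_seq user_messages)

-- ===== LEMMAS AND PROOFS =====

-- scanning with early return = head of the filtered list
theorem pvFind_eq_head_filter (q : Int → Bool) (l : List Int) :
    l.find? q = (l.filter q).head? := by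
  induction l with
  | nil => rfl
  | cons a t ih =>
    cases h : q a with
    | true => rw [List.find?_cons_of_pos h, List.filter_cons_of_pos h, List.head?_cons]
    | false =>
      rw [List.find?_cons_of_neg (by simp [h]), List.filter_cons_of_neg (by simp [h]), ih]

theorem pvFoldl_min_of_le (a : Int) (t : List Int) (h : ∀ x ∈ t, a ≤ x) :
    t.foldl min a = a := by
  induction t generalizing a with
  | nil => rfl
  | cons b t ih =>
    have hab : a ≤ b := h b (by simp)
    simp only [List.foldl_cons, min_eq_left hab]
    exact ih a (fun x hx => h x (by simp [hx]))

-- on an ascending list, min is the head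
theorem pvMin?_of_pairwise (l : List Int) (h : l.Pairwise (· ≤ ·)) :
    PySem.List.min? l (fun x => x) = l.head? := by
  cases l with
  | nil => simp [PySem.List.min?]
  | cons a t =>
    rw [PySem.List.min?_id_cons, List.head?_cons, Option.some.injEq]
    exact pvFoldl_min_of_le a t (fun x hx => List.rel_of_pairwise_cons h hx)

theorem pvMin?_of_perm (l₁ l₂ : List Int) (h : l₁.Perm l₂) :
    PySem.List.min? l₁ (fun x => x) = PySem.List.min? l₂ (fun x => x) := by
  cases h1 : PySem.List.min? l₁ (fun x => x) with
  | none =>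
    rw [PySem.List.min?_eq_none_iff] at h1
    subst h1
    rw [List.nil_perm] at h
    subst h
    rfl
  | some a =>
    cases h2 : PySem.List.min? l₂ (fun x => x) with
    | none =>
      rw [PySem.List.min?_eq_none_iff] at h2
      subst h2
      rw [List.perm_nil] at h
      subst h
      simp [PySem.List.min?] at h1
    | some b =>
      have ha := PySem.List.min?_mem h1
      have hb := PySem.List.min?_mem h2
      have hab : a ≤ b := PySem.List.min?_isMin h1 b (h.mem_iff.mpr hb)
      have hba : b ≤ a := PySem.List.min?_isMin h2 a (h.mem_iff.mp ha)
      rw [le_antisymm hab hba]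

-- (filter p l).map f = filter over the mapped values when p factors through f
theorem pvFilterMap (cs : Int) (f : List (String × Int) → Int) (l : List (List (String × Int))) :
    (l.filter (fun m => cs < f m)).map f
      = (l.map f).filter (fun v => decide (cs < v)) := by
  induction l with
  | nil => rfl
  | cons a t ih =>
    by_cases h : cs < f a
    · simp [h, ih]
    · simp [h, ih]

-- ===== VERDICT =====
theorem next_user_seq_py_spec : Claim_equal_next_user_seq_py := by
  intro cs ums _
  show next_user_seq_py cs ums = next_user_seq_py_alt cs ums
  unfold next_user_seq_py next_user_seq_py_alt
  simp only []
  set g : List (String × Int) → Int := fun m => (PySem.Dict.mk m).getD "sequence_id" 0 with hg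
  set vals : List Int := ums.map g with hv
  set s : List Int := PySem.List.sorted vals (fun x => x) false with hs
  set q : Int → Bool := fun v => decide (cs < v) with hq
  have hperm : s.Perm vals := PySem.List.sorted_perm vals (fun x => x) false
  have hpw : s.Pairwise (· ≤ ·) := by
    have := PySem.List.sorted_pairwise vals (fun x => x)
    simpa using this
  have hcand : (ums.filter (fun m => cs < g m)).map g = vals.filter q := pvFilterMap cs g ums
  rw [hcand, pvFind_eq_head_filter q s,
      ← pvMin?_of_pairwise (s.filter q) (hpw.filter q),
      pvMin?_of_perm (s.filter q) (vals.filter q) (hperm.filter q)]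
  by_cases he : (vals.filter q).isEmpty
  · rw [if_pos he, List.isEmpty_iff.mp he]
    rfl
  · rw [if_neg he]
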